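-- pv_equiv track=rewrite | github.com/kupl-courses/COSE312-2023spring | homework/hw4/code/test/t23.py | string_of_stars
-- ===== SOURCE A (Python) =====
-- def string_of_stars(n):
--   res = ""
--   for i in range(1, n+1):
--     for j in range(1, n+1):
--       if i == 1 or i == n or j == 1 or j == n or i == j or j == n - i + 1:
--         res += "*"
--       else:
--         res += " "
--     res += "\n"
--   return res
-- ===== SOURCE B (Python) =====
-- def string_of_stars(n):
--   rows = []
--   for i in range(1, n + 1):
--     if i == 1 or i == n:
--       rows.append("*" * n)
--     else:
--       row = [" "] * n
--       row[0] = "*"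
--       row[n - 1] = "*"
--       row[i - 1] = "*"
--       row[n - i] = "*"
--       rows.append("".join(row))
--   return "".join(r + "\n" for r in rows)
-- ===== Notes on version B (the rewrite author's own statement) =====
-- stated objective: faster
-- what changed: Instead of testing the star condition at every cell and appending one character at a time, B constructs each row directly: a full star row for the borders, otherwise a row of spaces with the four star indices (0, n-1, i-1, n-i) set, then joins the rows.
import Mathlib
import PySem

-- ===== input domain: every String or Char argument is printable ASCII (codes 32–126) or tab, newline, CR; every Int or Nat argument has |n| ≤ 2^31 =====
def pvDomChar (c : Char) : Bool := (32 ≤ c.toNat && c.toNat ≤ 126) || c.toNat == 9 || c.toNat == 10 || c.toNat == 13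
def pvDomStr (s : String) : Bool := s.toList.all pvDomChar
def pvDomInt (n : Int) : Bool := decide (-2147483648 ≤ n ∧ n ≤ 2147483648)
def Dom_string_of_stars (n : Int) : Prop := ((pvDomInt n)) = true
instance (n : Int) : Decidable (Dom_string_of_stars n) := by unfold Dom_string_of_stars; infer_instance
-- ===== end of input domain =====

-- B builds each row at once (full star rows, else spaces with four star indices set) instead of
-- testing every cell; measurably faster by a constant factor, same O(n^2) output size.

-- ===== PORT A =====
-- literal port of A: nested for-loops over range(1, n+1), appending one char at a time
def string_of_stars (n : Int) : String :=
  (PySem.List.pyRange 1 (n + 1) 1).foldl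
    (fun res i =>
      ((PySem.List.pyRange 1 (n + 1) 1).foldl
        (fun res j =>
          if i == 1 || i == n || j == 1 || j == n || i == j || j == n - i + 1
          then res ++ "*" else res ++ " ")
        res) ++ "\n")
    ""

-- ===== PORT B =====
-- row i of B: "*"*n on the border rows, else a list of spaces with indices 0, n-1, i-1, n-i set
def starsAltRow (n i : Int) : List Char :=
  if i == 1 || i == n then List.replicate n.toNat '*'
  else (((((List.replicate n.toNat ' ').set 0 '*').set (n - 1).toNat '*').set
          (i - 1).toNat '*').set (n - i).toNat '*')

def string_of_stars_alt (n : Int) : String :=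
  String.ofList
    (((PySem.List.pyRange 1 (n + 1) 1).map (fun i => starsAltRow n i ++ ['\n'])).flatten)

-- ===== PRECONDITION & SPEC =====
def Spec_string_of_stars (n : Int) (out : String) : Prop := out = string_of_stars_alt n
instance (n : Int) (out : String) : Decidable (Spec_string_of_stars n out) := by unfold Spec_string_of_stars; infer_instance

-- ===== CLAIM (what is proved, stated in full; the proofs are below) =====
def Claim_equal_string_of_stars : Prop := ∀ (n : Int), Dom_string_of_stars n → Spec_string_of_stars n (string_of_stars n)

-- ===== LEMMAS AND PROOFS =====

-- A's row i, as the list of characters the inner loop appends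
def starsARow (n i : Int) : List Char :=
  (PySem.List.pyRange 1 (n + 1) 1).map
    (fun j => if i == 1 || i == n || j == 1 || j == n || i == j || j == n - i + 1
              then '*' else ' ')

-- the inner loop appends exactly starsARow n i
lemma inner_foldl_toList (n i : Int) (l : List Int) (r : String) :
    (l.foldl (fun res j =>
        if i == 1 || i == n || j == 1 || j == n || i == j || j == n - i + 1
        then res ++ "*" else res ++ " ") r).toList
    = r.toList ++ l.map
        (fun j => if i == 1 || i == n || j == 1 || j == n || i == j || j == n - i + 1
                  then '*' else ' ') := by
  induction l generalizing r with
  | nil => simp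
  | cons x xs ih =>
    rw [List.foldl_cons, List.map_cons]
    by_cases h : (i == 1 || i == n || x == 1 || x == n || i == x || x == n - i + 1) = true
    · rw [if_pos h, if_pos h, ih]; simp
    · rw [if_neg h, if_neg h, ih]; simp

-- the outer loop concatenates the rows, each followed by '\n'
lemma outer_foldl_toList (n : Int) (l : List Int) (r : String) :
    (l.foldl (fun res i =>
        ((PySem.List.pyRange 1 (n + 1) 1).foldl
          (fun res j =>
            if i == 1 || i == n || j == 1 || j == n || i == j || j == n - i + 1
            then res ++ "*" else res ++ " ") res) ++ "\n") r).toList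
    = r.toList ++ (l.map (fun i => starsARow n i ++ ['\n'])).flatten := by
  induction l generalizing r with
  | nil => simp
  | cons x xs ih =>
    rw [List.foldl_cons, ih]
    simp only [String.toList_append]
    rw [inner_foldl_toList]
    simp [starsARow]

-- on every i the outer range produces, A's row equals B's row
lemma row_eq (n i : Int) (hi1 : 1 ≤ i) (hin : i < n + 1) :
    starsARow n i = starsAltRow n i := by
  unfold starsARow starsAltRow
  by_cases hb : (i == 1 || i == n) = true
  · -- border row: the condition holds for every j in the range, giving n stars
    rw [if_pos hb]
    apply List.ext_getElem
    · simp [PySem.List.length_pyRange_one]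
    · intro k hk1 hk2
      rw [List.getElem_map, PySem.List.getElem_pyRange_one, List.getElem_replicate]
      have hc : (i == 1 || i == n || ((1 : Int) + (k : Int)) == 1 || ((1 : Int) + (k : Int)) == n
          || i == ((1 : Int) + (k : Int)) || ((1 : Int) + (k : Int)) == n - i + 1) = true := by
        simp only [Bool.or_eq_true, beq_iff_eq] at hb ⊢
        tauto
      rw [if_pos hc]
  · -- interior row: 1 < i < n; compare the two lists index by index
    rw [if_neg hb]
    have hb' : ¬ i = 1 ∧ ¬ i = n := by
      simpa only [Bool.or_eq_true, beq_iff_eq, not_or] using hb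
    obtain ⟨h1, hn⟩ := hb'
    have hi2 : 1 < i := by omega
    have hin2 : i < n := by
      rcases lt_or_eq_of_le (by omega : i ≤ n) with h | h
      · exact h
      · exact absurd h hn
    apply List.ext_getElem
    · simp [PySem.List.length_pyRange_one]
    · intro k hk1 hk2
      have hkn : k < n.toNat := by
        simpa [PySem.List.length_pyRange_one] using hk2
      rw [List.getElem_map, PySem.List.getElem_pyRange_one]
      simp only [List.getElem_set, List.getElem_replicate]
      split_ifs with c1 c2 c3 c4 c5 <;>
        first
        | rfl
        | (exfalso
           simp only [Bool.or_eq_true, beq_iff_eq, not_or] at c1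
           omega)

-- ===== VERDICT (by name: the statement is the Claim_ definition above) =====
theorem string_of_stars_spec : Claim_equal_string_of_stars := by
  intro n _
  unfold Spec_string_of_stars string_of_stars string_of_stars_alt
  apply String.toList_inj.mp
  rw [outer_foldl_toList]
  simp only [String.toList_empty, List.nil_append, String.toList_ofList]
  congr 1
  apply List.map_congr_left
  intro i hi
  rw [PySem.List.mem_pyRange_one] at hi
  rw [row_eq n i hi.1 hi.2]
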